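-- pv_equiv track=rewrite | github.com/CS4248-G09/generic-pretrained-GEC | BART-GEC/ensemble/Ensemble.py | get_special_sentence
-- ===== SOURCE A (Python) =====
-- def get_special_sentence(sentence):
--     res = []
--     tokens = {}
--     s = "$"
--     for token in sentence.split(" "):
--         if token in tokens:
--             tokens[token] += 1
--         else:
--             tokens[token] = 0
--
--         c = tokens[token] * s
--         res.append(token + c)
--
--     return res
-- ===== SOURCE B (Python) =====
-- def get_special_sentence(sentence):
--     tokens = sentence.split(" ")
--     out = [""] * len(tokens)
--     for t in set(tokens):
--         k = 0
--         for i, x in enumerate(tokens):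
--             if x == t:
--                 out[i] = t + "$" * k
--                 k += 1
--     return out
-- ===== Notes on version B (the rewrite author's own statement) =====
-- stated objective: alternative
-- what changed: Replaces A's single pass with a running dict of counters by a group-and-scatter algorithm: pre-allocate the output, then for each distinct token walk the token list once and write its decorated occurrences into the output at their positions (out-of-order construction, no running counter table).
import Mathlib
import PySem

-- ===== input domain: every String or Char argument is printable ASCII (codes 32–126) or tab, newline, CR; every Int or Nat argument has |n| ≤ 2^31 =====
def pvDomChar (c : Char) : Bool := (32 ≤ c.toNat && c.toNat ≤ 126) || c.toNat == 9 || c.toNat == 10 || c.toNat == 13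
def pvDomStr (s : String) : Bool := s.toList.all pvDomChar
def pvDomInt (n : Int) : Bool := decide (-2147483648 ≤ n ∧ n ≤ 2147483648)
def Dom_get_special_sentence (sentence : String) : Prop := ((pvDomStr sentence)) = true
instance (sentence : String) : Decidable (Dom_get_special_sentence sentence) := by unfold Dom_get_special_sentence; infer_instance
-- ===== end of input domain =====

-- B replaces A's running counter dict by group-and-scatter: for each distinct token, one sweep writes
-- its decorated occurrences into a pre-allocated output at their positions (alternative, not faster).

-- ===== PORT A =====
-- loop state: (res, tokens); 'token + c' and '"$" * n' are ported via String.ofList on the char lists (exact for Python str concat/repeat)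
def get_special_sentence (sentence : String) : List String :=
  (((PySem.Str.split? sentence " ").getD []).foldl
    (fun (st : List String × PySem.Dict String Int) token =>
      let tokens := if st.2.contains token then st.2.modify token 0 (· + 1) else st.2.insert token 0
      let c := String.ofList (List.replicate (tokens.getD token 0).toNat '$')
      (st.1 ++ [String.ofList (token.toList ++ c.toList)], tokens))
    ([], PySem.Dict.empty)).1

-- ===== PORT B =====
-- out[i] = … is List.set; the written index p.1 comes from enumerate so it is ≥ 0 and .toNat is exact
def get_special_sentence_alt (sentence : String) : List String :=
  let tokens := (PySem.Str.split? sentence " ").getD []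
  let out0 := List.replicate tokens.length ""
  (PySem.Set.ofList tokens).foldl
    (fun out t =>
      ((PySem.List.enumerate tokens).foldl
        (fun (st : List String × Int) p =>
          if p.2 == t then
            (st.1.set p.1.toNat (String.ofList (t.toList ++ List.replicate st.2.toNat '$')), st.2 + 1)
          else st)
        (out, 0)).1)
    out0

-- ===== PRECONDITION & SPEC =====
def Spec_get_special_sentence (sentence : String) (out : List String) : Prop := out = get_special_sentence_alt sentence
instance (sentence : String) (out : List String) : Decidable (Spec_get_special_sentence sentence out) := by unfold Spec_get_special_sentence; infer_instance

-- ===== CLAIM (what is proved, stated in full; the proofs are below) =====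
def Claim_equal_get_special_sentence : Prop := ∀ (sentence : String), Dom_get_special_sentence sentence → Spec_get_special_sentence sentence (get_special_sentence sentence)

-- ===== LEMMAS AND PROOFS =====

-- the decorated token for position i: tokens[i] followed by one '$' per earlier occurrence
def pvDec (tokens : List String) (i : Nat) (t : String) : String :=
  String.ofList (t.toList ++ List.replicate ((tokens.take i).count t) '$')

-- canonical recursive description: j-th output token of `rest` decorated with its count in `pre`
def pvAux : List String → List String → List String
  | _, [] => []
  | pre, t :: rest => String.ofList (t.toList ++ List.replicate (pre.count t) '$') :: pvAux (pre ++ [t]) rest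

-- the dict invariant of A's loop: d.contains = membership in the processed prefix, d value = count-in-prefix − 1
theorem pvFold_eq_aux : ∀ (rest pre : List String) (d : PySem.Dict String Int) (res : List String),
    (∀ t, d.contains t = decide (t ∈ pre)) →
    (∀ t, t ∈ pre → d.getD t 0 = (pre.count t : Int) - 1) →
    (rest.foldl
      (fun (st : List String × PySem.Dict String Int) token =>
        let tokens := if st.2.contains token then st.2.modify token 0 (· + 1) else st.2.insert token 0
        let c := String.ofList (List.replicate (tokens.getD token 0).toNat '$')
        (st.1 ++ [String.ofList (token.toList ++ c.toList)], tokens))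
      (res, d)).1 = res ++ pvAux pre rest := by
  intro rest
  induction rest with
  | nil => intro pre d res _ _; simp [pvAux]
  | cons t rest ih =>
    intro pre d res hc hg
    by_cases hmem : t ∈ pre
    · have hct : d.contains t = true := by rw [hc]; simp [hmem]
      have hval : (d.modify t 0 (· + 1)).getD t 0 = (pre.count t : Int) := by
        rw [PySem.Dict.getD_modify]
        simp [hg t hmem]
      have hc' : ∀ t', (d.modify t 0 (· + 1)).contains t' = decide (t' ∈ pre ++ [t]) := by
        intro t'
        rw [PySem.Dict.contains_modify, hc]
        by_cases h : t' = t <;> simp [h, hmem]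
      have hg' : ∀ t', t' ∈ pre ++ [t] →
          (d.modify t 0 (· + 1)).getD t' 0 = (((pre ++ [t]).count t' : Nat) : Int) - 1 := by
        intro t' ht'
        rw [PySem.Dict.getD_modify]
        by_cases h : t' = t
        · rw [if_pos h, hg t hmem, h]
          simp [List.count_append]
        · rw [if_neg h, hg t' (by simpa [h] using ht')]
          have h0 : List.count t' [t] = 0 := by simp [Ne.symm h]
          simp [List.count_append, h0]
      simp only [List.foldl_cons, hct, if_true]
      rw [ih (pre ++ [t]) _ _ hc' hg', hval]
      simp [pvAux]
    · have hct : d.contains t = false := by rw [hc]; simp [hmem]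
      have hval : ((d.insert t 0).getD t 0) = 0 := by rw [PySem.Dict.getD_insert]; simp
      have hc' : ∀ t', (d.insert t 0).contains t' = decide (t' ∈ pre ++ [t]) := by
        intro t'
        rw [PySem.Dict.contains_insert, hc]
        by_cases h : t' = t <;> simp [h]
      have hg' : ∀ t', t' ∈ pre ++ [t] →
          (d.insert t 0).getD t' 0 = (((pre ++ [t]).count t' : Nat) : Int) - 1 := by
        intro t' ht'
        rw [PySem.Dict.getD_insert]
        by_cases h : t' = t
        · rw [if_pos h, h]
          have h0 : pre.count t = 0 := List.count_eq_zero.mpr hmem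
          simp [List.count_append, h0]
        · rw [if_neg h, hg t' (by simpa [h] using ht')]
          have h0 : List.count t' [t] = 0 := by simp [Ne.symm h]
          simp [List.count_append, h0]
      simp only [List.foldl_cons, hct, Bool.false_eq_true, if_false]
      rw [ih (pre ++ [t]) _ _ hc' hg', hval]
      have h0 : pre.count t = 0 := List.count_eq_zero.mpr hmem
      simp [pvAux, h0]

-- pvAux, read positionally: its i-th element is pvDec at i
theorem pvAux_getElem? : ∀ (rest pre : List String) (i : Nat),
    (pvAux pre rest)[i]? = rest[i]?.map (fun t => String.ofList (t.toList ++ List.replicate (((pre ++ rest).take (pre.length + i)).count t) '$')) := by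
  intro rest
  induction rest with
  | nil => intro pre i; simp [pvAux]
  | cons t rest ih =>
    intro pre i
    cases i with
    | zero =>
      simp [pvAux]
    | succ i =>
      simp only [pvAux, List.getElem?_cons_succ, ih (pre ++ [t]) i, List.getElem?_cons_succ]
      congr 2
      funext u
      congr 3
      have h1 : pre ++ t :: rest = (pre ++ [t]) ++ rest := by simp
      rw [h1]
      congr 1
      simp
      omega

-- B's inner sweep preserves the output length
theorem pvInnerLen (t : String) : ∀ (ps : List (Int × String)) (out : List String) (k : Int),
    ((ps.foldl
        (fun (st : List String × Int) p =>
          if p.2 == t then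
            (st.1.set p.1.toNat (String.ofList (t.toList ++ List.replicate st.2.toNat '$')), st.2 + 1)
          else st)
        (out, k)).1).length = out.length := by
  intro ps
  induction ps with
  | nil => intro out k; rfl
  | cons p ps ih =>
    intro out k
    simp only [List.foldl_cons]
    by_cases h : (p.2 == t) = true
    · rw [if_pos h, ih]; simp
    · rw [if_neg h, ih]

-- B's inner sweep for one distinct token t, pointwise: positions ≥ j holding t get pvDec, others keep out
theorem pvInner (tokens : List String) (t : String) : ∀ (rest : List String) (j : Nat) (out : List String),
    rest = tokens.drop j → out.length = tokens.length →
    ∀ i, (((PySem.List.enumerate rest (j : Int)).foldl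
        (fun (st : List String × Int) p =>
          if p.2 == t then
            (st.1.set p.1.toNat (String.ofList (t.toList ++ List.replicate st.2.toNat '$')), st.2 + 1)
          else st)
        (out, ((tokens.take j).count t : Int))).1)[i]? =
      if j ≤ i ∧ tokens[i]? = some t then some (pvDec tokens i t) else out[i]? := by
  intro rest
  induction rest with
  | nil =>
    intro j out hrest hout i
    simp only [PySem.List.enumerate_nil, List.foldl_nil]
    rw [if_neg]
    rintro ⟨hj, hs⟩
    have hlen : tokens.length ≤ j := by
      by_contra h
      have := List.drop_eq_nil_iff.mp hrest.symm
      omega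
    have : i < tokens.length := by
      by_contra h
      rw [List.getElem?_eq_none (by omega)] at hs
      simp at hs
    omega
  | cons x rest ih =>
    intro j out hrest hout i
    have hj : j < tokens.length := by
      by_contra h
      rw [List.drop_eq_nil_iff.mpr (by omega)] at hrest
      simp at hrest
    have hx : tokens[j]? = some x := by
      have h0 : (tokens.drop j)[0]? = some x := by rw [← hrest]; rfl
      rw [List.getElem?_drop] at h0
      simpa using h0
    have hxj : tokens[j] = x := by
      rw [List.getElem?_eq_getElem hj] at hx
      exact Option.some_inj.mp hx
    have hrest' : rest = tokens.drop (j + 1) := by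
      rw [← List.drop_drop, ← hrest]
      rfl
    have htake : tokens.take (j + 1) = tokens.take j ++ [tokens[j]] := by
      rw [List.take_add_one, List.getElem?_eq_getElem hj]
      rfl
    simp only [PySem.List.enumerate_cons, List.foldl_cons]
    by_cases hxt : x = t
    · -- write at j, counter increments
      have hcnt : (tokens.take (j + 1)).count t = (tokens.take j).count t + 1 := by
        rw [htake]; simp [List.count_append, hxj, hxt]
      rw [if_pos (by simp [hxt])]
      simp only [Int.toNat_natCast]
      have hout' : (out.set j (String.ofList (t.toList ++ List.replicate ((tokens.take j).count t) '$'))).length = tokens.length := by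
        simp [hout]
      have hih := ih (j + 1) _ hrest' hout' i
      rw [show (j : Int) + 1 = ((j + 1 : Nat) : Int) by push_cast; ring,
          show ((tokens.take j).count t : Int) + 1 = (((tokens.take (j + 1)).count t : Int)) by
            rw [hcnt]; push_cast; ring]
      rw [hih]
      by_cases hji : j = i
      · subst hji
        rw [if_neg (by omega), if_pos ⟨le_refl _, by rw [hx, hxt]⟩,
            List.getElem?_set_self (by omega)]
        simp [pvDec]
      · by_cases hcond : j + 1 ≤ i ∧ tokens[i]? = some t
        · rw [if_pos hcond, if_pos ⟨by omega, hcond.2⟩]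
        · rw [if_neg hcond, if_neg (by rintro ⟨h1, h2⟩; exact hcond ⟨by omega, h2⟩),
              List.getElem?_set_ne (by omega)]
    · -- skip x, counter unchanged
      have hcnt : (tokens.take (j + 1)).count t = (tokens.take j).count t := by
        rw [htake]; simp [List.count_append, hxj, hxt]
      rw [if_neg (by simp [hxt])]
      have hih := ih (j + 1) out hrest' hout i
      rw [hcnt] at hih
      rw [show (j : Int) + 1 = ((j + 1 : Nat) : Int) by push_cast; ring]
      rw [hih]
      by_cases hji : j = i
      · subst hji
        rw [if_neg (by omega), if_neg (by
          rintro ⟨_, h2⟩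
          rw [hx] at h2
          exact hxt (Option.some_inj.mp h2))]
      · by_cases hcond : j + 1 ≤ i ∧ tokens[i]? = some t
        · rw [if_pos hcond, if_pos ⟨by omega, hcond.2⟩]
        · rw [if_neg hcond, if_neg (by rintro ⟨h1, h2⟩; exact hcond ⟨by omega, h2⟩)]

-- B's outer loop, pointwise: positions whose token is among the processed distinct tokens hold pvDec
theorem pvOuter (tokens : List String) : ∀ (ts : List String) (out : List String),
    out.length = tokens.length → ∀ (i : Nat),
    ((ts.foldl
      (fun out t =>
        ((PySem.List.enumerate tokens).foldl
          (fun (st : List String × Int) p =>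
            if p.2 == t then
              (st.1.set p.1.toNat (String.ofList (t.toList ++ List.replicate st.2.toNat '$')), st.2 + 1)
            else st)
          (out, 0)).1)
      out))[i]? =
      if h : ∃ t ∈ ts, tokens[i]? = some t then some (pvDec tokens i h.choose) else out[i]? := by
  intro ts
  induction ts with
  | nil => intro out _ i; simp
  | cons t ts ih =>
    intro out hout i
    simp only [List.foldl_cons]
    have hinner := pvInner tokens t tokens 0 out rfl hout i
    simp only [Nat.zero_le, true_and, List.take_zero, List.count_nil, Nat.cast_zero] at hinner
    have hlen : (((PySem.List.enumerate tokens).foldl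
        (fun (st : List String × Int) p =>
          if p.2 == t then
            (st.1.set p.1.toNat (String.ofList (t.toList ++ List.replicate st.2.toNat '$')), st.2 + 1)
          else st)
        (out, 0)).1).length = tokens.length := by
      rw [pvInnerLen]; exact hout
    rw [ih _ hlen]
    -- compare the two dependent ifs
    by_cases hex : ∃ u ∈ ts, tokens[i]? = some u
    · have hu := hex.choose_spec
      have hex' : ∃ u ∈ t :: ts, tokens[i]? = some u := ⟨hex.choose, List.mem_cons_of_mem _ hu.1, hu.2⟩
      rw [dif_pos hex, dif_pos hex']
      have : hex.choose = hex'.choose :=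
        Option.some_inj.mp ((hex.choose_spec.2).symm.trans hex'.choose_spec.2)
      rw [this]
    · by_cases hti : tokens[i]? = some t
      · have hex' : ∃ u ∈ t :: ts, tokens[i]? = some u := ⟨t, List.mem_cons_self, hti⟩
        rw [dif_neg hex, dif_pos hex', hinner, if_pos hti]
        have : hex'.choose = t :=
          Option.some_inj.mp ((hex'.choose_spec.2).symm.trans hti)
        rw [this]
      · rw [dif_neg hex, dif_neg (by
          rintro ⟨u, hmem, hs⟩
          rcases List.mem_cons.mp hmem with h | h
          · exact hti (h ▸ hs)
          · exact hex ⟨u, h, hs⟩), hinner, if_neg hti]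

-- ===== VERDICT (by name: the statement is the Claim_ definition above) =====
theorem get_special_sentence_spec : Claim_equal_get_special_sentence := by
  intro sentence _
  unfold Spec_get_special_sentence get_special_sentence get_special_sentence_alt
  rw [pvFold_eq_aux _ [] PySem.Dict.empty [] (by simp) (by simp)]
  set tokens := (PySem.Str.split? sentence " ").getD [] with htok
  simp only [List.nil_append]
  apply List.ext_getElem?
  intro i
  rw [pvAux_getElem?, pvOuter _ _ _ (by simp)]
  by_cases hlt : i < tokens.length
  · have hs : tokens[i]? = some tokens[i] := List.getElem?_eq_getElem hlt
    have hmem : tokens[i] ∈ PySem.Set.ofList tokens := by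
      rw [PySem.Set.mem_ofList]
      exact List.getElem_mem hlt
    have hex : ∃ t ∈ PySem.Set.ofList tokens, tokens[i]? = some t := ⟨tokens[i], hmem, hs⟩
    have hch : hex.choose = tokens[i] :=
      Option.some_inj.mp ((hex.choose_spec.2).symm.trans hs)
    rw [dif_pos hex, hch]
    simp [hs, pvDec]
  · rw [List.getElem?_eq_none (by omega), dif_neg (by
      rintro ⟨u, _, hs⟩
      simp at hs)]
    simp [hlt]
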